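-- pv_equiv track=rewrite | github.com/pypi-data/pypi-mirror-1 | packages/nebgbdiff/nebgbdiff-0.0.4.tar.gz/nebgbdiff-0.0.4/nebgbdiff/location.py | new_coord
-- ===== SOURCE A (Python) =====
-- def new_coord(pos, table):
--     result = None
--     for pair in table:
--         if pos < pair[0] or pos > pair[1]:
--             continue
--         if result != None:
--             raise ValueError("Coordinate maps to multiple positions.")
--         result = pos - pair[0] + table[pair][0]
--     if result == None:
--         raise ValueError("Unable to map coordinate: %d" % pos)
--     return result
-- ===== SOURCE B (Python) =====
-- def _find_key(pos, keys):
--     """Recursively find the first interval key containing pos; once found,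
--     verify the remaining keys contain no second match and stop."""
--     if not keys:
--         raise ValueError("Unable to map coordinate: %d" % pos)
--     (a, b), rest = keys[0], keys[1:]
--     if not (a <= pos <= b):
--         return _find_key(pos, rest)
--     if any(c <= pos <= d for c, d in rest):
--         raise ValueError("Coordinate maps to multiple positions.")
--     return (a, b)
--
-- def new_coord(pos, table):
--     a, b = _find_key(pos, list(table))
--     return pos - a + table[(a, b)][0]
-- ===== Notes on version B (the rewrite author's own statement) =====
-- stated objective: alternative
-- what changed: Replaces A's single stateful pass (sentinel variable set on first match, raise on second, raise at the end) by a recursive find-then-verify decomposition: recurse to the first matching interval key, stop there, check the remaining keys with any() for a second match, and only then do the dict lookup and arithmetic at top level.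
import Mathlib
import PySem

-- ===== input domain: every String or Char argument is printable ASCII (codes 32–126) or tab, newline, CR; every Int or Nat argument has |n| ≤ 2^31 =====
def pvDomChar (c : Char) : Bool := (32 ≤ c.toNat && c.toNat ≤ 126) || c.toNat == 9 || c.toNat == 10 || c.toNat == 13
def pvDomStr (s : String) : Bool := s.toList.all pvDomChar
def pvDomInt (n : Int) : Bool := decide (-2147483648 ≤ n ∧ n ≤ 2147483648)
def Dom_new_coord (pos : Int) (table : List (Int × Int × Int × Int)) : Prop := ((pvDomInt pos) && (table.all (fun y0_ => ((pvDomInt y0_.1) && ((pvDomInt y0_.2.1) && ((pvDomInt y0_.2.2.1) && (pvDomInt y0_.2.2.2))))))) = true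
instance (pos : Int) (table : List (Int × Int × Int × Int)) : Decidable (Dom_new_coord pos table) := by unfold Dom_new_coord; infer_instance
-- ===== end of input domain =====

-- B replaces A's stateful single pass (sentinel result, raise on second match) by a
-- recursive find-then-verify decomposition; same O(n) cost, different control flow.
-- The dict table is the association list `table`: entry (a, b, c, d) means key (a, b) ↦ value (c, d).

-- ===== PORT A =====
-- table[pair]: dict lookup = first match in the association list (keys of a Python dict are distinct).
def pvDictGet (table : List (Int × Int × Int × Int)) (k : Int × Int) : Int × Int :=
  ((table.find? (fun e => e.1 == k.1 && e.2.1 == k.2)).map (fun e => e.2.2)).getD (0, 0)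

-- the `for pair in table` loop, state = `result`
def newCoordGo (pos : Int) (tbl : List (Int × Int × Int × Int)) :
    List (Int × Int × Int × Int) → Option Int → Option Int
  | [], result => result
  | e :: rest, result =>
      if pos < e.1 ∨ pos > e.2.1 then
        newCoordGo pos tbl rest result          -- continue
      else if result.isSome then
        newCoordGo pos tbl rest result          -- Python: raise ValueError (multiple positions); excluded by Pre_
      else
        newCoordGo pos tbl rest (some (pos - e.1 + (pvDictGet tbl (e.1, e.2.1)).1))

def new_coord (pos : Int) (table : List (Int × Int × Int × Int)) : Int :=
  (newCoordGo pos table table none).getD 0      -- getD 0: Python raises when result is None; excluded by Pre_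

-- ===== PORT B =====
-- _find_key: recurse to the first matching key, then verify the rest with any().
def findKeyB (pos : Int) : List (Int × Int × Int × Int) → Option (Int × Int)
  | [] => none                                   -- Python: raise ValueError (unable to map); excluded by Pre_
  | e :: rest =>
      if ¬ (e.1 ≤ pos ∧ pos ≤ e.2.1) then
        findKeyB pos rest
      else if rest.any (fun f => decide (f.1 ≤ pos) && decide (pos ≤ f.2.1)) then
        none                                     -- Python: raise ValueError (multiple positions); excluded by Pre_
      else
        some (e.1, e.2.1)

def new_coord_alt (pos : Int) (table : List (Int × Int × Int × Int)) : Int :=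
  match findKeyB pos table with
  | some (a, b) => pos - a + (pvDictGet table (a, b)).1
  | none => 0                                    -- Python raised inside _find_key; excluded by Pre_

-- ===== PRECONDITION & SPEC =====
-- Pre_ admits exactly the inputs with exactly one interval key containing pos; on all others A raises ValueError.
def Pre_new_coord (pos : Int) (table : List (Int × Int × Int × Int)) : Prop :=
  (table.filter (fun e => decide (e.1 ≤ pos) && decide (pos ≤ e.2.1))).length = 1
instance (pos : Int) (table : List (Int × Int × Int × Int)) : Decidable (Pre_new_coord pos table) := by
  unfold Pre_new_coord; infer_instance

def pvWitness_new_coord : Int × (List (Int × Int × Int × Int)) := (3, [(0, 5, 10, 0)])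

def Spec_new_coord (pos : Int) (table : List (Int × Int × Int × Int)) (out : Int) : Prop := out = new_coord_alt pos table
instance (pos : Int) (table : List (Int × Int × Int × Int)) (out : Int) : Decidable (Spec_new_coord pos table out) := by unfold Spec_new_coord; infer_instance

-- ===== CLAIM (what is proved, stated in full; the proofs are below) =====
def Claim_equal_new_coord : Prop := ∀ (pos : Int) (table : List (Int × Int × Int × Int)), Dom_new_coord pos table → Pre_new_coord pos table → Spec_new_coord pos table (new_coord pos table)

-- ===== LEMMAS AND PROOFS =====

-- A's loop is the fold of "set result if unset" over the matching entries.
theorem newCoordGo_eq_foldl (pos : Int) (tbl : List (Int × Int × Int × Int)) :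
    ∀ (l : List (Int × Int × Int × Int)) (acc : Option Int),
      newCoordGo pos tbl l acc =
        (l.filter (fun e => decide (e.1 ≤ pos) && decide (pos ≤ e.2.1))).foldl
          (fun a e => if a.isSome then a else some (pos - e.1 + (pvDictGet tbl (e.1, e.2.1)).1)) acc := by
  intro l
  induction l with
  | nil => intro acc; rfl
  | cons e rest ih =>
    intro acc
    rw [List.filter_cons]
    by_cases h : pos < e.1 ∨ pos > e.2.1
    · have hf : (decide (e.1 ≤ pos) && decide (pos ≤ e.2.1)) = false := by
        rcases h with h | h <;> simp <;> omega
      rw [hf, if_neg (by simp)]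
      rw [newCoordGo, if_pos h, ih]
    · have hf : (decide (e.1 ≤ pos) && decide (pos ≤ e.2.1)) = true := by
        rw [not_or, not_lt, not_lt] at h
        simp [h.1, h.2]
      rw [hf, if_pos rfl, List.foldl_cons]
      rw [newCoordGo, if_neg h]
      by_cases ha : acc.isSome
      · rw [if_pos ha, if_pos ha, ih]
      · rw [if_neg ha, if_neg (by simpa using ha), ih]

-- B's recursion returns the key of the unique match when the filter is a singleton.
theorem findKeyB_of_filter_singleton (pos : Int) (e : Int × Int × Int × Int) :
    ∀ (l : List (Int × Int × Int × Int)),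
      l.filter (fun f => decide (f.1 ≤ pos) && decide (pos ≤ f.2.1)) = [e] →
      findKeyB pos l = some (e.1, e.2.1) := by
  intro l
  induction l with
  | nil => intro h; simp at h
  | cons f rest ih =>
    intro h
    rw [List.filter_cons] at h
    by_cases hm : f.1 ≤ pos ∧ pos ≤ f.2.1
    · rw [if_pos (by simp [hm.1, hm.2])] at h
      have hfe : f = e := (List.cons_eq_cons.mp h).1
      have hrest : rest.filter (fun f => decide (f.1 ≤ pos) && decide (pos ≤ f.2.1)) = [] :=
        (List.cons_eq_cons.mp h).2
      have hany : rest.any (fun f => decide (f.1 ≤ pos) && decide (pos ≤ f.2.1)) = false := by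
        rw [List.any_eq_false]
        intro x hx
        have := List.filter_eq_nil_iff.mp hrest x hx
        simpa using this
      rw [findKeyB, if_neg (by simpa using hm), hany]
      simp [hfe]
    · rw [if_neg (by simpa using hm)] at h
      rw [findKeyB, if_pos hm, ih h]

-- ===== VERDICT (by name: the statement is the Claim_ definition above) =====
theorem new_coord_spec : Claim_equal_new_coord := by
  intro pos table _ hpre
  unfold Pre_new_coord at hpre
  obtain ⟨e, he⟩ := List.length_eq_one_iff.mp hpre
  unfold Spec_new_coord new_coord new_coord_alt
  rw [newCoordGo_eq_foldl, he, findKeyB_of_filter_singleton pos e table he]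
  rfl
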